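-- pv_equiv track=rewrite | github.com/frkl/trojai-fuzzing-vision | util/perm_inv_sparse.py | sparse_einsum_filter
-- ===== SOURCE A (Python) =====
-- def all_equal(iterator):
--     iterator = iter(iterator)
--     try:
--         first = next(iterator)
--     except StopIteration:
--         return True
--     return all(first == x for x in iterator)
--
-- def sparse_einsum_filter(s,idx,val):
--     s=list(s)
--     #find chars in s that appeared more than once
--     occ={}
--     for i,ch in enumerate(s):
--         if not ch in occ:
--             occ[ch]=[]
--
--         occ[ch].append(i)
--
--     checklist={ch:occ[ch] for ch in occ if len(occ[ch])>1}
--     keep=[]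
--     for i,ind in enumerate(idx):
--         k=True
--         for ch in checklist:
--             if not all_equal([ind[j] for j in checklist[ch]]):
--                 k=False;
--                 break;
--
--         if k:
--             keep.append(i)
--
--     idx=[idx[i] for i in keep]
--     val=[val[i] for i in keep]
--     return idx,val
-- ===== SOURCE B (Python) =====
-- def sparse_einsum_filter(s, idx, val):
--     # pass 1: one scan of s, pairing each later occurrence of a character with
--     # that character's first occurrence
--     first = {}
--     pairs = []
--     for j, ch in enumerate(s):
--         if ch in first:
--             pairs.append((j, first[ch]))
--         else:
--             first[ch] = j
--     # pass 2: column-major sweep — each position pair refines a keep-mask over all rows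
--     ok = [True] * len(idx)
--     for j, j0 in pairs:
--         ok = [o and row[j] == row[j0] for o, row in zip(ok, idx)]
--     # pass 3: filter rows and values by the mask
--     return [row for row, o in zip(idx, ok) if o], [v for v, o in zip(val, ok) if o]
-- ===== Notes on version B (the rewrite author's own statement) =====
-- stated objective: alternative
-- what changed: A loops row-major (for each row, group positions by character in a dict and run all_equal per repeated-character group with an early break); B transposes the computation into three staged passes: one scan of s emits (later-occurrence, first-occurrence) position pairs via a running first-seen dict, then each pair sweeps column-major over all rows refining a boolean keep-mask, and a final pass filters idx and val by the mask.
-- outside the precondition, e.g. on sparse_einsum_filter('aabb', [(1, 2)], [7]): A returns ([], []), B returns ([], []); on sparse_einsum_filter('aa', [(1, 2)], []): A returns ([], []), B returns ([], [])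
import Mathlib
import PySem

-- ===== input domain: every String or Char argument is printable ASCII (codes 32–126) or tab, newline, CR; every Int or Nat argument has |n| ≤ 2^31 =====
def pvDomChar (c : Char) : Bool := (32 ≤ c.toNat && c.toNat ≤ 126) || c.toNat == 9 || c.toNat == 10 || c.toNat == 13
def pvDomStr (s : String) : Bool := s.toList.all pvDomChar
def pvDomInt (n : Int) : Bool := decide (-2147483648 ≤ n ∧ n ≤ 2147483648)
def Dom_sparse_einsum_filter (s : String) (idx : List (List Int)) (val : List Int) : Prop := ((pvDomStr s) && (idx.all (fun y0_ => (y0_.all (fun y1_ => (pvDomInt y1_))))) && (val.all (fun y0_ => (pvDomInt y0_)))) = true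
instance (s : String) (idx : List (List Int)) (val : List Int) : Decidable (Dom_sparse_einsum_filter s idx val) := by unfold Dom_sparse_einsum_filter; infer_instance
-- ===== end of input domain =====

-- B transposes A's row-major check: one scan of s emits (later occurrence, first
-- occurrence) position pairs, each pair then sweeps column-major over all rows refining
-- a boolean keep-mask, and a final pass filters idx and val by the mask.

-- ===== PORT A =====
-- port of all_equal
def pvAllEqual (l : List Int) : Bool :=
  match l with
  | [] => true
  | x :: xs => xs.all (fun y => x == y)

-- occ: char -> list of its positions ('if ch not in occ: occ[ch]=[]; occ[ch].append(i)')
def pvOcc (cs : List Char) : PySem.Dict Char (List Int) :=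
  (PySem.List.enumerate cs).foldl (fun d q => d.modify q.2 [] (fun l => l ++ [q.1])) PySem.Dict.empty

-- checklist: the groups of characters occurring more than once (as ordered items)
def pvChecklist (cs : List Char) : List (Char × List Int) :=
  (pvOcc cs).items.filter (fun p => decide (1 < p.2.length))

-- inner loop of A: 'for ch in checklist: if not all_equal([ind[j] for j in checklist[ch]]) …'
def pvRowOkA (cs : List Char) (row : List Int) : Bool :=
  (pvChecklist cs).all (fun p => pvAllEqual (p.2.map (fun j => PySem.List.pyGetD row j 0)))

def sparse_einsum_filter (s : String) (idx : List (List Int)) (val : List Int) :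
    List (List Int) × List Int :=
  let keep : List Int :=
    (PySem.List.enumerate idx).foldl
      (fun ks q => if pvRowOkA s.toList q.2 then ks ++ [q.1] else ks) []
  (keep.map (fun i => PySem.List.pyGetD idx i []),
   keep.map (fun i => PySem.List.pyGetD val i 0))

-- ===== PORT B =====
-- pass 1: 'for j, ch in enumerate(s): if ch in first: pairs.append((j, first[ch])) else: first[ch] = j'
def pvScanPairs (cs : List Char) : List (Int × Int) :=
  ((PySem.List.enumerate cs).foldl
    (fun st q =>
      match st.1.get? q.2 with
      | some j0 => (st.1, st.2 ++ [(q.1, j0)])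
      | none => (st.1.insert q.2 q.1, st.2))
    ((PySem.Dict.empty : PySem.Dict Char Int), ([] : List (Int × Int)))).2

-- one step of pass 2: 'ok = [o and row[j] == row[j0] for o, row in zip(ok, idx)]'
def pvMaskStep (idx : List (List Int)) (ok : List Bool) (pr : Int × Int) : List Bool :=
  (ok.zip idx).map (fun p => p.1 && (PySem.List.pyGetD p.2 pr.1 0 == PySem.List.pyGetD p.2 pr.2 0))

def sparse_einsum_filter_alt (s : String) (idx : List (List Int)) (val : List Int) :
    List (List Int) × List Int :=
  let pairs := pvScanPairs s.toList
  let ok := pairs.foldl (pvMaskStep idx) (List.replicate idx.length true)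
  (((idx.zip ok).filter (fun p => p.2)).map Prod.fst,
   ((val.zip ok).filter (fun p => p.2)).map Prod.fst)

-- ===== PRECONDITION & SPEC =====
-- Pre_ excludes inputs on which Python A raises IndexError (a row shorter than some
-- repeated-index position it reads, or more idx rows than val entries); it is slightly
-- wider than A's raising set: a row rejected before the out-of-range access still
-- returns in A, and excess short-val rows that are all rejected also return.
def Pre_sparse_einsum_filter (s : String) (idx : List (List Int)) (val : List Int) : Prop :=
  idx.length ≤ val.length ∧
  ∀ row ∈ idx, ∀ q ∈ PySem.List.enumerate s.toList,
    1 < s.toList.count q.2 → q.1 < (row.length : Int)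
instance (s : String) (idx : List (List Int)) (val : List Int) : Decidable (Pre_sparse_einsum_filter s idx val) := by unfold Pre_sparse_einsum_filter; infer_instance

def pvWitness_sparse_einsum_filter : String × List (List Int) × List Int :=
  ("aab", [[1, 1, 2], [1, 2, 3]], [10, 20])

def Spec_sparse_einsum_filter (s : String) (idx : List (List Int)) (val : List Int) (out : List (List Int) × List Int) : Prop := out = sparse_einsum_filter_alt s idx val
instance (s : String) (idx : List (List Int)) (val : List Int) (out : List (List Int) × List Int) : Decidable (Spec_sparse_einsum_filter s idx val out) := by unfold Spec_sparse_einsum_filter; infer_instance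

-- ===== CLAIM (what is proved, stated in full; the proofs are below) =====
def Claim_equal_sparse_einsum_filter : Prop := ∀ (s : String) (idx : List (List Int)) (val : List Int), Dom_sparse_einsum_filter s idx val → Pre_sparse_einsum_filter s idx val → Spec_sparse_einsum_filter s idx val (sparse_einsum_filter s idx val)

-- ===== LEMMAS AND PROOFS =====

-- the proposition both per-row checks decide: positions holding the same character
-- carry equal row values
def pvSame (cs : List Char) (row : List Int) : Prop :=
  ∀ k k' (hk : k < cs.length) (hk' : k' < cs.length),
    cs[k] = cs[k'] → PySem.List.pyGetD row (k : Int) 0 = PySem.List.pyGetD row (k' : Int) 0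

-- first index of c in cs (c ∈ cs), and the pair list B's scan produces, index?-style
def pvFirstIdx (cs : List Char) (c : Char) : Int :=
  (((PySem.List.index? cs c).getD 0 : Nat) : Int)

def pvPairs (cs : List Char) : List (Int × Int) :=
  ((PySem.List.enumerate cs).filter (fun q => !(pvFirstIdx cs q.2 == q.1))).map
    (fun q => (q.1, pvFirstIdx cs q.2))

def pvRowOkB (cs : List Char) (row : List Int) : Bool :=
  (pvPairs cs).all (fun pr => PySem.List.pyGetD row pr.1 0 == PySem.List.pyGetD row pr.2 0)

theorem pvAllEqual_iff (l : List Int) :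
    pvAllEqual l = true ↔ ∀ x ∈ l, ∀ y ∈ l, x = y := by
  cases l with
  | nil => simp [pvAllEqual]
  | cons x xs =>
    simp only [pvAllEqual, List.all_eq_true, beq_iff_eq]
    constructor
    · intro h a ha b hb
      have ex : ∀ z ∈ x :: xs, x = z := by
        intro z hz
        rcases List.mem_cons.mp hz with rfl | hz
        · rfl
        · exact h z hz
      exact (ex a ha).symm.trans (ex b hb)
    · intro h y hy
      exact h x List.mem_cons_self y (List.mem_cons_of_mem x hy)

theorem pvTwoMemLt {α : Type} {l : List α} {a b : α}
    (ha : a ∈ l) (hb : b ∈ l) (hne : a ≠ b) : 1 < l.length := by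
  match l with
  | [] => cases ha
  | [x] =>
    simp only [List.mem_singleton] at ha hb
    exact absurd (ha.trans hb.symm) hne
  | x :: y :: t => simp

theorem pvOcc_getD (cs : List Char) (c : Char) :
    (pvOcc cs).getD c [] =
      ((PySem.List.enumerate cs).filter (fun q => q.2 == c)).map (fun q => q.1) := by
  have h : pvOcc cs =
      ((PySem.List.enumerate cs).map (fun q => (q.2, q.1))).foldl
        (fun d p => d.modify p.1 [] (fun l => l ++ [p.2])) PySem.Dict.empty := by
    unfold pvOcc; rw [List.foldl_map]
  rw [h, PySem.Dict.getD_foldl_modify_append]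
  simp [List.filter_map, List.map_map, Function.comp_def]

theorem pvOcc_keys (cs : List Char) :
    (pvOcc cs).keys = PySem.Set.ofList cs := by
  have h : (pvOcc cs).keys =
      PySem.Set.update (PySem.Dict.empty : PySem.Dict Char (List Int)).keys
        ((PySem.List.enumerate cs).map Prod.snd) :=
    PySem.Dict.keys_foldl_modify_key _ Prod.snd [] (fun _ q => (fun l => l ++ [q.1])) _
  rw [h, PySem.Dict.keys_empty, PySem.List.map_snd_enumerate, PySem.Set.update_nil_left]

theorem pvOcc_keys_nodup (cs : List Char) : (pvOcc cs).keys.Nodup :=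
  PySem.Dict.nodup_keys_foldl_modify_key _ Prod.snd [] (fun _ q => (fun l => l ++ [q.1])) _
    PySem.Dict.nodup_keys_empty

theorem pvMem_occ_getD (cs : List Char) (c : Char) (j : Int) :
    j ∈ (pvOcc cs).getD c [] ↔ ∃ k, ∃ _ : k < cs.length, j = (k : Int) ∧ cs[k] = c := by
  rw [pvOcc_getD]
  simp only [List.mem_map, List.mem_filter, PySem.List.mem_enumerate_iff, beq_iff_eq]
  constructor
  · rintro ⟨q, ⟨⟨k, hk, rfl⟩, hc⟩, rfl⟩
    exact ⟨k, hk, by simp, hc⟩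
  · rintro ⟨k, hk, rfl, hc⟩
    exact ⟨((k : Int), cs[k]), ⟨⟨k, hk, by simp⟩, hc⟩, rfl⟩

theorem pvMem_checklist (cs : List Char) (p : Char × List Int) :
    p ∈ pvChecklist cs ↔ p.1 ∈ cs ∧ p.2 = (pvOcc cs).getD p.1 [] ∧ 1 < p.2.length := by
  have hitems := PySem.Dict.items_eq_map_keys (pvOcc cs) (pvOcc_keys_nodup cs) []
  simp only [pvChecklist, List.mem_filter, hitems, List.mem_map, pvOcc_keys,
    decide_eq_true_eq]
  constructor
  · rintro ⟨⟨k, hk, rfl⟩, hl⟩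
    exact ⟨(PySem.Set.mem_ofList cs k).mp hk, rfl, hl⟩
  · rintro ⟨hc, h2, hl⟩
    exact ⟨⟨p.1, (PySem.Set.mem_ofList cs p.1).mpr hc, by rw [← h2]⟩, hl⟩

theorem pvFirstIdx_spec (cs : List Char) (c : Char) (h : c ∈ cs) :
    ∃ f, ∃ _ : f < cs.length, pvFirstIdx cs c = (f : Int) ∧ cs[f] = c := by
  have hs : (PySem.List.index? cs c).isSome = true :=
    (PySem.List.index?_isSome_iff cs c).mpr h
  obtain ⟨f, hf⟩ := Option.isSome_iff_exists.mp hs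
  obtain ⟨hlt, hcf, -⟩ := PySem.List.getElem_of_index?_eq_some hf
  refine ⟨f, hlt, ?_, hcf⟩
  simp only [pvFirstIdx]
  rw [hf]
  rfl

theorem pvRowOkA_iff (cs : List Char) (row : List Int) :
    pvRowOkA cs row = true ↔ pvSame cs row := by
  simp only [pvRowOkA, List.all_eq_true]
  constructor
  · intro h k k' hk hk' hc
    by_cases hkk : k = k'
    · subst hkk; rfl
    · set c := cs[k] with hck
      have hm : (k : Int) ∈ (pvOcc cs).getD c [] :=
        (pvMem_occ_getD cs c _).mpr ⟨k, hk, rfl, rfl⟩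
      have hm' : (k' : Int) ∈ (pvOcc cs).getD c [] :=
        (pvMem_occ_getD cs c _).mpr ⟨k', hk', rfl, hc.symm⟩
      have hlen : 1 < ((pvOcc cs).getD c []).length :=
        pvTwoMemLt hm hm' (by exact_mod_cast hkk)
      have hmem : (c, (pvOcc cs).getD c []) ∈ pvChecklist cs :=
        (pvMem_checklist cs _).mpr ⟨List.getElem_mem hk, rfl, hlen⟩
      have := (pvAllEqual_iff _).mp (h _ hmem)
      exact this _ (List.mem_map_of_mem hm) _ (List.mem_map_of_mem hm')
  · intro h p hp
    obtain ⟨-, h2, -⟩ := (pvMem_checklist cs p).mp hp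
    rw [pvAllEqual_iff]
    rintro x hx y hy
    obtain ⟨j, hj, rfl⟩ := List.mem_map.mp hx
    obtain ⟨j', hj', rfl⟩ := List.mem_map.mp hy
    rw [h2] at hj hj'
    obtain ⟨k, hk, rfl, hck⟩ := (pvMem_occ_getD cs p.1 j).mp hj
    obtain ⟨k', hk', rfl, hck'⟩ := (pvMem_occ_getD cs p.1 j').mp hj'
    exact h k k' hk hk' (hck.trans hck'.symm)

theorem pvRowOkB_iff (cs : List Char) (row : List Int) :
    pvRowOkB cs row = true ↔ pvSame cs row := by
  simp only [pvRowOkB, List.all_eq_true]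
  constructor
  · intro h k k' hk hk' hc
    obtain ⟨f, hf, hfi, hcf⟩ := pvFirstIdx_spec cs cs[k] (List.getElem_mem hk)
    have step : ∀ m (hm : m < cs.length), cs[m] = cs[k] →
        PySem.List.pyGetD row (m : Int) 0 = PySem.List.pyGetD row (f : Int) 0 := by
      intro m hm hcm
      by_cases hmf : (m : Int) = (f : Int)
      · rw [hmf]
      · have hq : ((m : Int), cs[m]) ∈
            (PySem.List.enumerate cs).filter (fun q => !(pvFirstIdx cs q.2 == q.1)) := by
          refine List.mem_filter.mpr ⟨?_, ?_⟩
          · exact (PySem.List.mem_enumerate_iff cs 0 _).mpr ⟨m, hm, by simp⟩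
          · simp only [hcm, hfi, Bool.not_eq_eq_eq_not, Bool.not_true, beq_eq_false_iff_ne,
              ne_eq]
            exact fun e => hmf e.symm
        have hmem : ((m : Int), pvFirstIdx cs cs[m]) ∈ pvPairs cs :=
          List.mem_map.mpr ⟨_, hq, rfl⟩
        simpa [hcm, hfi] using h _ hmem
    exact (step k hk rfl).trans (step k' hk' hc.symm).symm
  · intro h pr hpr
    obtain ⟨q, hq, rfl⟩ := List.mem_map.mp hpr
    obtain ⟨hqe, -⟩ := List.mem_filter.mp hq
    obtain ⟨k, hk, rfl⟩ := (PySem.List.mem_enumerate_iff cs 0 q).mp hqe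
    obtain ⟨f, hf, hfi, hcf⟩ := pvFirstIdx_spec cs cs[k] (List.getElem_mem hk)
    simp only [hfi, beq_iff_eq, zero_add]
    exact h k f hk hf hcf.symm

theorem pvRowOk_eq (cs : List Char) (row : List Int) :
    pvRowOkA cs row = pvRowOkB cs row := by
  by_cases h : pvSame cs row
  · rw [(pvRowOkA_iff cs row).mpr h, (pvRowOkB_iff cs row).mpr h]
  · rw [Bool.eq_false_iff.mpr fun hA => h ((pvRowOkA_iff cs row).mp hA),
        Bool.eq_false_iff.mpr fun hB => h ((pvRowOkB_iff cs row).mp hB)]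

-- ===== B-side: the scan produces exactly pvPairs =====
theorem pvScan_aux (cs : List Char) (rest : List Char) (m : Nat)
    (d : PySem.Dict Char Int) (acc : List (Int × Int))
    (hrest : rest = cs.drop m)
    (hd : ∀ c : Char, d.get? c =
      (match PySem.List.index? cs c with
       | some k => if k < m then some ((k : Nat) : Int) else none
       | none => none)) :
    ((PySem.List.enumerate rest (m : Int)).foldl
      (fun st q =>
        match st.1.get? q.2 with
        | some j0 => (st.1, st.2 ++ [(q.1, j0)])
        | none => (st.1.insert q.2 q.1, st.2)) (d, acc)).2
    = acc ++ ((PySem.List.enumerate rest (m : Int)).filter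
        (fun q => !(pvFirstIdx cs q.2 == q.1))).map (fun q => (q.1, pvFirstIdx cs q.2)) := by
  induction rest generalizing m d acc with
  | nil => simp [PySem.List.enumerate_nil]
  | cons r rest' ih =>
    have hm : m < cs.length := by
      by_contra hge
      rw [List.drop_eq_nil_of_le (by omega)] at hrest
      exact List.cons_ne_nil r rest' hrest
    have hcm : cs[m] = r := by
      have h0 : cs[m]? = some r := by
        calc cs[m]? = (cs.drop m)[0]? := by rw [List.getElem?_drop]; norm_num
        _ = some r := by rw [← hrest]; rfl
      have h1 : cs[m]? = some cs[m] := List.getElem?_eq_getElem hm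
      rw [h0] at h1
      exact (Option.some.inj h1).symm
    have hrest' : rest' = cs.drop (m + 1) := by
      have h1 : (r :: rest').drop 1 = rest' := rfl
      rw [hrest, List.drop_drop] at h1
      rw [← h1]
    have hmemr : r ∈ cs := hcm ▸ List.getElem_mem hm
    obtain ⟨k, hk⟩ := Option.isSome_iff_exists.mp
      ((PySem.List.index?_isSome_iff cs r).mpr hmemr)
    obtain ⟨hklt, hck, hkmin⟩ := PySem.List.getElem_of_index?_eq_some hk
    have hkm : k ≤ m := by
      by_contra hlt
      exact hkmin m (by omega) hcm
    have hfir : pvFirstIdx cs r = ((k : Nat) : Int) := by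
      simp only [pvFirstIdx]; rw [hk]; rfl
    rw [PySem.List.enumerate_cons, List.foldl_cons, List.filter_cons]
    dsimp only
    have hstep1 : ((m : Int) + 1) = (((m + 1 : Nat)) : Int) := by push_cast; ring
    by_cases hklm : k < m
    · -- repeated character: emit the pair (m, k)
      have hget : d.get? r = some ((k : Nat) : Int) := by
        rw [hd r, hk]; simp [hklm]
      have hkeep : (!(pvFirstIdx cs r == ((m : Int)))) = true := by
        have hkne : ((k : Nat) : Int) ≠ ((m : Nat) : Int) := by
          exact_mod_cast Nat.ne_of_lt hklm
        rw [hfir]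
        simp [hkne]
      rw [hget]
      rw [if_pos hkeep]
      dsimp only
      rw [hstep1, ih (m + 1) d (acc ++ [((m : Int), ((k : Nat) : Int))]) hrest' ?_]
      · simp [hfir, List.append_assoc]
      · intro c
        rw [hd c]
        cases hic : PySem.List.index? cs c with
        | none => rfl
        | some k' =>
          obtain ⟨hk'lt, hck', -⟩ := PySem.List.getElem_of_index?_eq_some hic
          have hne : k' ≠ m := by
            intro he
            subst he
            rw [hcm] at hck'
            subst hck'
            rw [hk] at hic
            have := Option.some.inj hic
            omega
          dsimp only
          split_ifs with h1 h2 <;> first | rfl | omega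
    · -- first occurrence: insert, emit nothing
      have hkm' : k = m := by omega
      subst hkm'
      have hget : d.get? r = none := by
        rw [hd r, hk]; simp
      have hdrop : (!(pvFirstIdx cs r == ((k : Nat) : Int))) = false := by
        rw [hfir]; simp
      rw [hget]
      rw [if_neg (by rw [hdrop]; simp)]
      dsimp only
      rw [hstep1, ih (k + 1) (d.insert r ((k : Nat) : Int)) acc hrest' ?_]
      intro c
      by_cases hcr : c = r
      · subst hcr
        rw [hk]
        simp
      · rw [PySem.Dict.get?_insert_of_ne d ((k : Nat) : Int) hcr, hd c]
        cases hic : PySem.List.index? cs c with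
        | none => rfl
        | some k' =>
          obtain ⟨hk'lt, hck', -⟩ := PySem.List.getElem_of_index?_eq_some hic
          have hne : k' ≠ k := by
            intro he
            subst he
            rw [hcm] at hck'
            exact hcr hck'.symm
          dsimp only
          split_ifs with h1 h2 <;> first | rfl | omega

theorem pvScanPairs_eq (cs : List Char) : pvScanPairs cs = pvPairs cs := by
  unfold pvScanPairs pvPairs
  have h := pvScan_aux cs cs 0 PySem.Dict.empty [] (by simp)
    (by intro c; rw [PySem.Dict.get?_empty]; cases PySem.List.index? cs c <;> simp)
  simpa using h

-- ===== B-side: the mask fold computes per-row all-pairs =====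
theorem pvZipReplicate {α : Type} (l : List α) (b : Bool) :
    (List.replicate l.length b).zip l = l.map (fun x => (b, x)) := by
  induction l with
  | nil => rfl
  | cons x t ih => simp [List.replicate_succ, ih]

theorem pvRezip {α β γ δ : Type} (g : α × β → γ) (h : γ × β → δ) (l : List α) (r : List β) :
    (((l.zip r).map g).zip r).map h = (l.zip r).map (fun p => h (g p, p.2)) := by
  induction l generalizing r with
  | nil => rfl
  | cons x t ih =>
    cases r with
    | nil => rfl
    | cons y u => simp [ih]

theorem pvMaskFold (idx : List (List Int)) (pairs : List (Int × Int)) (ok : List Bool)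
    (h : ok.length ≤ idx.length) :
    pairs.foldl (pvMaskStep idx) ok
      = (ok.zip idx).map (fun p => p.1 &&
          pairs.all (fun pr => PySem.List.pyGetD p.2 pr.1 0 == PySem.List.pyGetD p.2 pr.2 0)) := by
  induction pairs generalizing ok with
  | nil =>
    simp only [List.foldl_nil, List.all_nil, Bool.and_true]
    exact (List.map_fst_zip h).symm
  | cons pr prs ih =>
    rw [List.foldl_cons]
    have hlen : (pvMaskStep idx ok pr).length ≤ idx.length := by
      simp [pvMaskStep, List.length_zip]
    rw [ih _ hlen]
    unfold pvMaskStep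
    rw [pvRezip]
    apply List.map_congr_left
    intro p _
    simp [Bool.and_assoc]

-- ===== assembling the filtered outputs =====
theorem pvFilterMaskSelf (K : List Int → Bool) (idx : List (List Int)) :
    ((idx.zip (idx.map K)).filter (fun p => p.2)).map Prod.fst = idx.filter K := by
  induction idx with
  | nil => rfl
  | cons r t ih =>
    by_cases hr : K r <;> simp [hr, ih]

theorem pvFilterMaskOther (K : List Int → Bool) (idx : List (List Int)) (val : List Int)
    (h : idx.length ≤ val.length) :
    ((val.zip (idx.map K)).filter (fun p => p.2)).map Prod.fst
      = ((idx.zip val).filter (fun rv => K rv.1)).map Prod.snd := by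
  induction idx generalizing val with
  | nil => simp
  | cons r t ih =>
    cases val with
    | nil => simp at h
    | cons v vt =>
      simp only [List.length_cons, Nat.add_le_add_iff_right] at h
      by_cases hr : K r <;> simp [hr, ih vt h]

theorem pvZipFilterFst (K : List Int → Bool) (idx : List (List Int)) (val : List Int)
    (h : idx.length ≤ val.length) :
    ((idx.zip val).filter (fun rv => K rv.1)).map Prod.fst = idx.filter K := by
  induction idx generalizing val with
  | nil => simp
  | cons r t ih =>
    cases val with
    | nil => simp at h
    | cons v vt =>
      simp only [List.length_cons, Nat.add_le_add_iff_right] at h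
      by_cases hr : K r <;> simp [hr, ih vt h]

theorem pvEnumerateMap {α β : Type} (f : α → β) (l : List α) (st : Int) :
    PySem.List.enumerate (l.map f) st
      = (PySem.List.enumerate l st).map (fun p => (p.1, f p.2)) := by
  induction l generalizing st with
  | nil => simp [PySem.List.enumerate_nil]
  | cons x t ih => simp [PySem.List.enumerate_cons, ih]

-- A's output, as a zip-filter over (idx, val)
theorem pvA_eq (s : String) (idx : List (List Int)) (val : List Int)
    (hlen : idx.length ≤ val.length) :
    sparse_einsum_filter s idx val
      = (((idx.zip val).filter (fun rv => pvRowOkA s.toList rv.1)).map Prod.fst,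
         ((idx.zip val).filter (fun rv => pvRowOkA s.toList rv.1)).map Prod.snd) := by
  unfold sparse_einsum_filter
  set cs := s.toList
  set K := pvRowOkA cs with hK
  set W := idx.zip val with hWdef
  have hWfst : W.map Prod.fst = idx := List.map_fst_zip hlen
  have hWlen : W.length = idx.length := by
    rw [hWdef, List.length_zip]; omega
  rw [PySem.List.foldl_append_if (fun q => pvRowOkA cs q.2) (fun q => q.1)
    (PySem.List.enumerate idx) []]
  dsimp only
  have hEnum : PySem.List.enumerate idx 0
      = (PySem.List.enumerate W 0).map (fun p => (p.1, p.2.1)) := by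
    conv_lhs => rw [← hWfst]
    exact pvEnumerateMap Prod.fst W 0
  have hfilt : (PySem.List.enumerate idx 0).filter (fun q => pvRowOkA cs q.2)
      = ((PySem.List.enumerate W 0).filter (fun p => K p.2.1)).map (fun p => (p.1, p.2.1)) := by
    rw [hEnum, List.filter_map]; rfl
  have hmemE : ∀ p ∈ (PySem.List.enumerate W 0).filter (fun p => K p.2.1),
      ∃ k, ∃ _ : k < W.length, p = ((k : Int), W[k]) := by
    intro p hp
    obtain ⟨k, hk, hpk⟩ := (PySem.List.mem_enumerate_iff W 0 p).mp (List.mem_filter.mp hp).1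
    exact ⟨k, hk, by simpa using hpk⟩
  have hWside : ∀ {γ : Type} (sel : List Int × Int → γ),
      (W.filter (fun rv => K rv.1)).map sel
        = ((PySem.List.enumerate W 0).filter (fun p => K p.2.1)).map (fun p => sel p.2) := by
    intro γ sel
    conv_lhs => rw [← PySem.List.map_snd_enumerate W 0, List.filter_map]
    rw [List.map_map]; rfl
  simp only [List.nil_append]
  refine Prod.ext ?_ ?_
  · dsimp only
    rw [hfilt]
    simp only [List.map_map]
    rw [hWside (fun rv => rv.1)]
    apply List.map_congr_left
    intro p hp
    obtain ⟨k, hk, rfl⟩ := hmemE p hp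
    have hki : k < idx.length := by omega
    simp only [Function.comp_apply, PySem.List.pyGetD_natCast]
    rw [List.getD_eq_getElem idx [] hki]
    have hz : W[k] = (idx[k], val[k]) := List.getElem_zip
    rw [hz]
  · dsimp only
    rw [hfilt]
    simp only [List.map_map]
    rw [hWside (fun rv => rv.2)]
    apply List.map_congr_left
    intro p hp
    obtain ⟨k, hk, rfl⟩ := hmemE p hp
    have hkv : k < val.length := by omega
    simp only [Function.comp_apply, PySem.List.pyGetD_natCast]
    rw [List.getD_eq_getElem val 0 hkv]
    have hz : W[k] = (idx[k], val[k]) := List.getElem_zip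
    rw [hz]

-- B's output, in the same form
theorem pvB_eq (s : String) (idx : List (List Int)) (val : List Int)
    (hlen : idx.length ≤ val.length) :
    sparse_einsum_filter_alt s idx val
      = (((idx.zip val).filter (fun rv => pvRowOkB s.toList rv.1)).map Prod.fst,
         ((idx.zip val).filter (fun rv => pvRowOkB s.toList rv.1)).map Prod.snd) := by
  unfold sparse_einsum_filter_alt
  dsimp only
  have hok : (pvScanPairs s.toList).foldl (pvMaskStep idx) (List.replicate idx.length true)
      = idx.map (fun row => pvRowOkB s.toList row) := by
    rw [pvMaskFold idx _ _ (by simp), pvZipReplicate, List.map_map]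
    apply List.map_congr_left
    intro row _
    simp [pvRowOkB, pvScanPairs_eq]
  rw [hok]
  refine Prod.ext ?_ ?_
  · dsimp only
    rw [pvFilterMaskSelf, pvZipFilterFst _ _ _ hlen]
  · dsimp only
    rw [pvFilterMaskOther _ _ _ hlen]

-- ===== VERDICT (by name: the statement is the Claim_ definition above) =====
theorem sparse_einsum_filter_spec : Claim_equal_sparse_einsum_filter := by
  intro s idx val _hdom hpre
  obtain ⟨hlen, -⟩ := hpre
  unfold Spec_sparse_einsum_filter
  rw [pvA_eq s idx val hlen, pvB_eq s idx val hlen]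
  have hKeq : (fun rv : List Int × Int => pvRowOkA s.toList rv.1)
      = (fun rv : List Int × Int => pvRowOkB s.toList rv.1) := by
    funext rv; exact pvRowOk_eq s.toList rv.1
  rw [hKeq]
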